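-- pv_equiv track=rewrite | github.com/mortyc126-debug/SHA | nk_biased_birthday.py | carry_count
-- ===== SOURCE A (Python) =====
-- MASK32 = 0xFFFFFFFF
--
-- K = [0x428a2f98,0x71374491,0xb5c0fbcf,0xe9b5dba5,0x3956c25b,0x59f111f1,0x923f82a4,0xab1c5ed5,0xd807aa98,0x12835b01,0x243185be,0x550c7dc3,0x72be5d74,0x80deb1fe,0x9bdc06a7,0xc19bf174,0xe49b69c1,0xefbe4786,0x0fc19dc6,0x240ca1cc,0x2de92c6f,0x4a7484aa,0x5cb0a9dc,0x76f988da,0x983e5152,0xa831c66d,0xb00327c8,0xbf597fc7,0xc6e00bf3,0xd5a79147,0x06ca6351,0x14292967,0x27b70a85,0x2e1b2138,0x4d2c6dfc,0x53380d13,0x650a7354,0x766a0abb,0x81c2c92e,0x92722c85,0xa2bfe8a1,0xa81a664b,0xc24b8b70,0xc76c51a3,0xd192e819,0xd6990624,0xf40e3585,0x106aa070,0x19a4c116,0x1e376c08,0x2748774c,0x34b0bcb5,0x391c0cb3,0x4ed8aa4a,0x5b9cca4f,0x682e6ff3,0x748f82ee,0x78a5636f,0x84c87814,0x8cc70208,0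x90befffa,0xa4506ceb,0xbef9a3f7,0xc67178f2]
--
-- IV = [0x6a09e667,0xbb67ae85,0x3c6ef372,0xa54ff53a,0x510e527f,0x9b05688c,0x1f83d9ab,0x5be0cd19]
--
-- def rotr(x,n): return ((x>>n)|(x<<(32-n)))&MASK32
--
-- def sig0(x): return rotr(x,2)^rotr(x,13)^rotr(x,22)
--
-- def sig1(x): return rotr(x,6)^rotr(x,11)^rotr(x,25)
--
-- def ssig0(x): return rotr(x,7)^rotr(x,18)^(x>>3)
--
-- def ssig1(x): return rotr(x,17)^rotr(x,19)^(x>>10)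
--
-- def ch(e,f,g): return (e&f)^(~e&g)&MASK32
--
-- def maj(a,b,c): return (a&b)^(a&c)^(b&c)
--
-- def carry_count(M, R=64):
--     """Count total carry-out events across all rounds."""
--     W = list(M)+[0]*(64-len(M))
--     for i in range(16,64): W[i]=(ssig1(W[i-2])+W[i-7]+ssig0(W[i-15])+W[i-16])&MASK32
--     a,b,c,d,e,f,g,h = IV
--     total_carry = 0
--     for r in range(R):
--         T1=(h+sig1(e)+ch(e,f,g)+K[r]+W[r])&MASK32
--         T2=(sig0(a)+maj(a,b,c))&MASK32
--         # carry for e_new = d + T1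
--         if (d + T1) > MASK32: total_carry += 1
--         # carry for a_new = T1 + T2
--         if (T1 + T2) > MASK32: total_carry += 1
--         h,g,f=g,f,e; e=(d+T1)&MASK32; d,c,b=c,b,a; a=(T1+T2)&MASK32
--     return total_carry
-- ===== SOURCE B (Python) =====
-- MASK32 = 0xFFFFFFFF
--
-- K = [0x428a2f98,0x71374491,0xb5c0fbcf,0xe9b5dba5,0x3956c25b,0x59f111f1,0x923f82a4,0xab1c5ed5,0xd807aa98,0x12835b01,0x243185be,0x550c7dc3,0x72be5d74,0x80deb1fe,0x9bdc06a7,0xc19bf174,0xe49b69c1,0xefbe4786,0x0fc19dc6,0x240ca1cc,0x2de92c6f,0x4a7484aa,0x5cb0a9dc,0x76f988da,0x983e5152,0xa831c66d,0xb00327c8,0xbf597fc7,0xc6e00bf3,0xd5a79147,0x06ca6351,0x14292967,0x27b70a85,0x2e1b2138,0x4d2c6dfc,0x53380d13,0x650a7354,0x766a0abb,0x81c2c92e,0x92722c85,0xa2bfe8a1,0xa81a664b,0xc24b8b70,0xc76c51a3,0xd192e819,0xd6990624,0xf40e3585,0x106aa070,0x19a4c116,0x1e376c08,0x2748774c,0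x34b0bcb5,0x391c0cb3,0x4ed8aa4a,0x5b9cca4f,0x682e6ff3,0x748f82ee,0x78a5636f,0x84c87814,0x8cc70208,0x90befffa,0xa4506ceb,0xbef9a3f7,0xc67178f2]
--
-- IV = [0x6a09e667,0xbb67ae85,0x3c6ef372,0xa54ff53a,0x510e527f,0x9b05688c,0x1f83d9ab,0x5be0cd19]
--
-- def rotr(x,n): return ((x>>n)|(x<<(32-n)))&MASK32
-- def sig0(x): return rotr(x,2)^rotr(x,13)^rotr(x,22)
-- def sig1(x): return rotr(x,6)^rotr(x,11)^rotr(x,25)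
-- def ssig0(x): return rotr(x,7)^rotr(x,18)^(x>>3)
-- def ssig1(x): return rotr(x,17)^rotr(x,19)^(x>>10)
-- def ch(e,f,g): return (e&f)^(~e&g)&MASK32
-- def maj(a,b,c): return (a&b)^(a&c)^(b&c)
--
-- def carry_count(M, R=64):
--     """Count total carry-out events across all rounds, with a fused single
--     pass: the message schedule is produced on the fly from a 16-word rolling
--     window instead of a precomputed 64-word array."""
--     a,b,c,d,e,f,g,h = IV
--     window = []          # the last (up to 16) schedule words
--     total_carry = 0
--     for r in range(R):
--         if r < 16:
--             w = M[r] if r < len(M) else 0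
--         else:
--             w = (ssig1(window[14]) + window[9] + ssig0(window[1]) + window[0]) & MASK32
--             window = window[1:]
--         window.append(w)
--         T1 = (h + sig1(e) + ch(e,f,g) + K[r] + w) & MASK32
--         T2 = (sig0(a) + maj(a,b,c)) & MASK32
--         if (d + T1) > MASK32: total_carry += 1
--         if (T1 + T2) > MASK32: total_carry += 1
--         h,g,f = g,f,e; e = (d+T1)&MASK32; d,c,b = c,b,a; a = (T1+T2)&MASK32
--     return total_carry
-- ===== Notes on version B (the rewrite author's own statement) =====
-- stated objective: alternative
-- what changed: B fuses A's two passes (precompute all 64 schedule words into a W array, then run the rounds) into a single round loop that generates each schedule word on the fly from a 16-word rolling window, so the 64-word W array and the separate schedule pass disappear; Pre_ excludes R > 64, where A raises IndexError on K[r] (B raises there too).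
import Mathlib
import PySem

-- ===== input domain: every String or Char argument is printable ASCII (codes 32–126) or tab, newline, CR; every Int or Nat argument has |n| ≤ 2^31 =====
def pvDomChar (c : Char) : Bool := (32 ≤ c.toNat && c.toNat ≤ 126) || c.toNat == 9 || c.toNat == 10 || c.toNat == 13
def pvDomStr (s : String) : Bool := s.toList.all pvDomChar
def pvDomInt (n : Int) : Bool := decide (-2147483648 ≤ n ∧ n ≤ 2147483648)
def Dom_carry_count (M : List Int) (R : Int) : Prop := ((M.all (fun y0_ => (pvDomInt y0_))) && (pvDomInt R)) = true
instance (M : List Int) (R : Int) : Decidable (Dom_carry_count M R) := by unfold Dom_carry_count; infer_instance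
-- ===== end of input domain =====

-- B fuses A's two passes (64-word schedule array, then rounds) into one round loop with a
-- 16-word rolling window; equivalence of the returned carry count is proved for R ≤ 64
-- (for R > 64 both programs raise IndexError on K[r]).

-- ===== PORT A =====
-- module-level context shared by both ports (MASK32, K, rotr, sig0, sig1, ssig0, ssig1, ch, maj)
def pvMask : Int := 4294967295

def pvK : List Int := [0x428a2f98,0x71374491,0xb5c0fbcf,0xe9b5dba5,0x3956c25b,0x59f111f1,0x923f82a4,0xab1c5ed5,0xd807aa98,0x12835b01,0x243185be,0x550c7dc3,0x72be5d74,0x80deb1fe,0x9bdc06a7,0xc19bf174,0xe49b69c1,0xefbe4786,0x0fc19dc6,0x240ca1cc,0x2de92c6f,0x4a7484aa,0x5cb0a9dc,0x76f988da,0x983e5152,0xa831c66d,0xb00327c8,0xbf597fc7,0xc6e00bf3,0xd5a79147,0x06ca6351,0x14292967,0x27b70a85,0x2e1b2138,0x4d2c6dfc,0x53380d13,0x650a7354,0x766a0abb,0x81c2c92e,0x92722c85,0xa2bfe8a1,0xa81a664b,0xc24b8b70,0xc76c51a3,0xd192e819,0xd6990624,0xf40e3585,0x106aa070,0x19a4c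116,0x1e376c08,0x2748774c,0x34b0bcb5,0x391c0cb3,0x4ed8aa4a,0x5b9cca4f,0x682e6ff3,0x748f82ee,0x78a5636f,0x84c87814,0x8cc70208,0x90befffa,0xa4506ceb,0xbef9a3f7,0xc67178f2]

-- rotr(x,n): n is always a literal 2..25 in this module, so a Nat parameter is exact
def pvRotr (x : Int) (n : Nat) : Int :=
  PySem.Int.band (PySem.Int.bor (x >>> n) (x <<< (32 - n))) pvMask

def pvSig0 (x : Int) : Int := PySem.Int.bxor (PySem.Int.bxor (pvRotr x 2) (pvRotr x 13)) (pvRotr x 22)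
def pvSig1 (x : Int) : Int := PySem.Int.bxor (PySem.Int.bxor (pvRotr x 6) (pvRotr x 11)) (pvRotr x 25)
def pvSsig0 (x : Int) : Int := PySem.Int.bxor (PySem.Int.bxor (pvRotr x 7) (pvRotr x 18)) (x >>> 3)
def pvSsig1 (x : Int) : Int := PySem.Int.bxor (PySem.Int.bxor (pvRotr x 17) (pvRotr x 19)) (x >>> 10)
-- ch: Python precedence gives (e&f) ^ ((~e&g) & MASK32)
def pvCh (e f g : Int) : Int :=
  PySem.Int.bxor (PySem.Int.band e f) (PySem.Int.band (PySem.Int.band (Int.not e) g) pvMask)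
def pvMaj (a b c : Int) : Int :=
  PySem.Int.bxor (PySem.Int.bxor (PySem.Int.band a b) (PySem.Int.band a c)) (PySem.Int.band b c)

-- A's state: (a,b,c,d,e,f,g,h,total_carry)
abbrev pvStA := Int × Int × Int × Int × Int × Int × Int × Int × Int

-- A's schedule pass: W = list(M)+[0]*(64-len(M)); for i in range(16,64): W[i] = …
-- (W[i-2] etc. are always in range, so getD is exact Python indexing here)
def pvSchedA (M : List Int) : List Int :=
  (List.range' 16 48).foldl
    (fun W i => W.set i (PySem.Int.band
      (pvSsig1 (W.getD (i-2) 0) + W.getD (i-7) 0 + pvSsig0 (W.getD (i-15) 0) + W.getD (i-16) 0) pvMask))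
    (M ++ List.replicate (64 - M.length) 0)

-- one round of A's loop; K[r] and W[r] are in range for r < 64 (Pre_ excludes R > 64, where Python raises IndexError)
def pvStepA (W : List Int) (st : pvStA) (r : Int) : pvStA :=
  let (a,b,c,d,e,f,g,h,total) := st
  let T1 := PySem.Int.band (h + pvSig1 e + pvCh e f g + pvK.getD r.toNat 0 + W.getD r.toNat 0) pvMask
  let T2 := PySem.Int.band (pvSig0 a + pvMaj a b c) pvMask
  let total := if pvMask < d + T1 then total + 1 else total
  let total := if pvMask < T1 + T2 then total + 1 else total
  (PySem.Int.band (T1 + T2) pvMask, a, b, c, PySem.Int.band (d + T1) pvMask, e, f, g, total)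

def carry_count (M : List Int) (R : Int) : Int :=
  let W := pvSchedA M
  -- a,b,c,d,e,f,g,h = IV; total_carry = 0
  let st := (PySem.List.pyRange 0 R 1).foldl (pvStepA W)
    (0x6a09e667, 0xbb67ae85, 0x3c6ef372, 0xa54ff53a, 0x510e527f, 0x9b05688c, 0x1f83d9ab, 0x5be0cd19, 0)
  st.2.2.2.2.2.2.2.2

-- ===== PORT B =====
-- B's state: (window, a,b,c,d,e,f,g,h,total_carry)
abbrev pvStB := List Int × pvStA

-- one round of B's loop: produce the schedule word w from the 16-word rolling window
-- (window[14],[9],[1],[0] are in range once r ≥ 16; window[1:] is `drop 1`)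
def pvStepB (M : List Int) (st : pvStB) (r : Int) : pvStB :=
  let (win, a,b,c,d,e,f,g,h,total) := st
  let w := if r < 16 then (if r < (M.length : Int) then M.getD r.toNat 0 else 0)
    else PySem.Int.band
      (pvSsig1 (win.getD 14 0) + win.getD 9 0 + pvSsig0 (win.getD 1 0) + win.getD 0 0) pvMask
  let win := (if r < 16 then win else win.drop 1) ++ [w]
  let T1 := PySem.Int.band (h + pvSig1 e + pvCh e f g + pvK.getD r.toNat 0 + w) pvMask
  let T2 := PySem.Int.band (pvSig0 a + pvMaj a b c) pvMask
  let total := if pvMask < d + T1 then total + 1 else total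
  let total := if pvMask < T1 + T2 then total + 1 else total
  (win, PySem.Int.band (T1 + T2) pvMask, a, b, c, PySem.Int.band (d + T1) pvMask, e, f, g, total)

def carry_count_alt (M : List Int) (R : Int) : Int :=
  let st := (PySem.List.pyRange 0 R 1).foldl (pvStepB M)
    ([], 0x6a09e667, 0xbb67ae85, 0x3c6ef372, 0xa54ff53a, 0x510e527f, 0x9b05688c, 0x1f83d9ab, 0x5be0cd19, 0)
  st.2.2.2.2.2.2.2.2.2

-- ===== PRECONDITION & SPEC =====
-- Pre_ excludes exactly R > 64: there Python A raises IndexError on K[r] at round 64 (B does too)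
def Pre_carry_count (M : List Int) (R : Int) : Prop := R ≤ 64
instance (M : List Int) (R : Int) : Decidable (Pre_carry_count M R) := by unfold Pre_carry_count; infer_instance
def pvWitness_carry_count : List Int × Int := ([1, 2, 3], 8)

def Spec_carry_count (M : List Int) (R : Int) (out : Int) : Prop := out = carry_count_alt M R
instance (M : List Int) (R : Int) (out : Int) : Decidable (Spec_carry_count M R out) := by unfold Spec_carry_count; infer_instance

-- ===== CLAIM (what is proved, stated in full; the proofs are below) =====
def Claim_equal_carry_count : Prop := ∀ (M : List Int) (R : Int), Dom_carry_count M R → Pre_carry_count M R → Spec_carry_count M R (carry_count M R)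

-- ===== LEMMAS AND PROOFS =====

-- the mathematical message schedule both programs compute
def pvWf (M : List Int) : Nat → Int
  | i =>
    if _h : i < 16 then (if i < M.length then M.getD i 0 else 0)
    else PySem.Int.band
      (pvSsig1 (pvWf M (i-2)) + pvWf M (i-7) + pvSsig0 (pvWf M (i-15)) + pvWf M (i-16)) pvMask
  termination_by i => i
  decreasing_by all_goals omega

lemma pvWf_lt16 (M : List Int) (i : Nat) (h : i < 16) :
    pvWf M i = (if i < M.length then M.getD i 0 else 0) := by
  rw [pvWf]; simp [h]

lemma pvWf_ge16 (M : List Int) (i : Nat) (h : 16 ≤ i) :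
    pvWf M i = PySem.Int.band
      (pvSsig1 (pvWf M (i-2)) + pvWf M (i-7) + pvSsig0 (pvWf M (i-15)) + pvWf M (i-16)) pvMask := by
  rw [pvWf]; simp [Nat.not_lt.mpr h]

lemma pvPad_getD (M : List Int) (k : Nat) :
    (M ++ List.replicate (64 - M.length) 0).getD k 0 = (if k < M.length then M.getD k 0 else 0) := by
  rcases Nat.lt_or_ge k M.length with h | h
  · simp [List.getD_eq_getElem?_getD, List.getElem?_append_left h, h]
  · simp [List.getD_eq_getElem?_getD, List.getElem?_append_right h, Nat.not_lt.mpr h,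
      List.getElem?_replicate]
    split <;> simp

lemma pvSet_getD_ne (l : List Int) (i k : Nat) (v : Int) (h : i ≠ k) :
    (l.set i v).getD k 0 = l.getD k 0 := by
  simp [List.getD_eq_getElem?_getD, h]

lemma pvSet_getD_eq (l : List Int) (i : Nat) (v : Int) (h : i < l.length) :
    (l.set i v).getD i 0 = v := by
  simp [List.getD_eq_getElem?_getD, h]

lemma pvMapRange'_getD (f : Nat → Int) (s n j : Nat) (h : j < n) :
    ((List.range' s n).map f).getD j 0 = f (s + j) := by
  simp [List.getD_eq_getElem?_getD, h]

-- invariant of A's schedule pass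
lemma pvSchedA_inv (M : List Int) (n : Nat) (hn : n ≤ 48) :
    let L := (List.range' 16 n).foldl
      (fun W i => W.set i (PySem.Int.band
        (pvSsig1 (W.getD (i-2) 0) + W.getD (i-7) 0 + pvSsig0 (W.getD (i-15) 0) + W.getD (i-16) 0) pvMask))
      (M ++ List.replicate (64 - M.length) 0)
    64 ≤ L.length ∧ (∀ k, k < 16 + n → L.getD k 0 = pvWf M k) ∧
      (∀ k, 16 + n ≤ k → L.getD k 0 = (M ++ List.replicate (64 - M.length) 0).getD k 0) := by
  induction n with
  | zero =>
      refine ⟨by simp; omega, fun k hk => ?_, fun k _ => by simp⟩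
      simp only [List.range'_zero, List.foldl_nil]
      rw [pvPad_getD, pvWf_lt16 M k (by omega)]
  | succ m ih =>
      have hm : m ≤ 48 := by omega
      specialize ih hm
      obtain ⟨hlen, hlo, hhi⟩ := ih
      rw [List.range'_concat]
      simp only [List.foldl_append, List.foldl_cons, List.foldl_nil]
      set L := (List.range' 16 m).foldl
        (fun W i => W.set i (PySem.Int.band
          (pvSsig1 (W.getD (i-2) 0) + W.getD (i-7) 0 + pvSsig0 (W.getD (i-15) 0) + W.getD (i-16) 0) pvMask))
        (M ++ List.replicate (64 - M.length) 0) with hL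
      have hidx : 16 + 1 * m = 16 + m := by omega
      rw [hidx]
      have hval : PySem.Int.band
          (pvSsig1 (L.getD (16+m-2) 0) + L.getD (16+m-7) 0 + pvSsig0 (L.getD (16+m-15) 0) + L.getD (16+m-16) 0) pvMask
          = pvWf M (16+m) := by
        rw [hlo _ (by omega), hlo _ (by omega), hlo _ (by omega), hlo _ (by omega),
          pvWf_ge16 M (16+m) (by omega)]
      refine ⟨by simpa using hlen, fun k hk => ?_, fun k hk => ?_⟩
      · rcases Nat.lt_or_ge k (16+m) with h | h
        · rw [pvSet_getD_ne _ _ _ _ (by omega), hlo _ h]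
        · have : k = 16 + m := by omega
          subst this
          rw [pvSet_getD_eq _ _ _ (by omega), hval]
      · rw [pvSet_getD_ne _ _ _ _ (by omega), hhi _ (by omega)]

lemma pvSchedA_getD (M : List Int) (r : Nat) (hr : r < 64) :
    (pvSchedA M).getD r 0 = pvWf M r := by
  have := pvSchedA_inv M 48 (by omega)
  exact this.2.1 r (by omega)

-- the window B holds at the start of round r
def pvWin (M : List Int) (r : Nat) : List Int :=
  (List.range' (r - min r 16) (min r 16)).map (pvWf M)

lemma pvRange_nil (r R : Int) (h : ¬ r < R) : PySem.List.pyRange r R 1 = [] := by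
  simp [PySem.List.pyRange]; omega

-- one synchronized step
lemma pvStep_sync (M : List Int) (r : Nat) (hr : r < 64) (st : pvStA) :
    pvStepB M (pvWin M r, st) r = (pvWin M (r+1), pvStepA (pvSchedA M) st r) := by
  obtain ⟨a,b,c,d,e,f,g,h,total⟩ := st
  have htn : ((r : Int)).toNat = r := by omega
  rcases Nat.lt_or_ge r 16 with h16 | h16
  · have hri : ((r : Int)) < 16 := by exact_mod_cast h16
    have hw : (if (r : Int) < (M.length : Int) then M.getD r 0 else 0) = pvWf M r := by
      rw [pvWf_lt16 M r h16]
      by_cases hm : r < M.length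
      · rw [if_pos (by exact_mod_cast hm), if_pos hm]
      · rw [if_neg (by exact_mod_cast hm), if_neg hm]
    have hwin : pvWin M r ++ [pvWf M r] = pvWin M (r+1) := by
      unfold pvWin
      have h1 : min r 16 = r := by omega
      have h2 : min (r+1) 16 = r+1 := by omega
      rw [h1, h2]
      simp [List.range'_concat]
    simp only [pvStepB, pvStepA, if_pos hri, hw, hwin, htn,
      pvSchedA_getD M r hr]
  · have hri : ¬ ((r : Int)) < 16 := by exact_mod_cast Nat.not_lt.mpr h16
    have hwin0 : pvWin M r = (List.range' (r - 16) 16).map (pvWf M) := by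
      unfold pvWin
      have h1 : min r 16 = 16 := by omega
      rw [h1]
    have hget : ∀ j, j < 16 → (pvWin M r).getD j 0 = pvWf M (r - 16 + j) := by
      intro j hj
      rw [hwin0, pvMapRange'_getD _ _ _ _ hj]
    have hw : PySem.Int.band
        (pvSsig1 ((pvWin M r).getD 14 0) + (pvWin M r).getD 9 0 +
          pvSsig0 ((pvWin M r).getD 1 0) + (pvWin M r).getD 0 0) pvMask = pvWf M r := by
      rw [hget 14 (by omega), hget 9 (by omega), hget 1 (by omega), hget 0 (by omega),
        pvWf_ge16 M r h16]
      have e1 : r - 16 + 14 = r - 2 := by omega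
      have e2 : r - 16 + 9 = r - 7 := by omega
      have e3 : r - 16 + 1 = r - 15 := by omega
      have e4 : r - 16 + 0 = r - 16 := by omega
      rw [e1, e2, e3, e4]
    have hwin : (pvWin M r).drop 1 ++ [pvWf M r] = pvWin M (r+1) := by
      have hL : (pvWin M r).drop 1 = (List.range' (r-15) 15).map (pvWf M) := by
        rw [hwin0]
        have hc : List.range' (r-16) 16 = (r-16) :: List.range' (r-15) 15 := by
          have := List.range'_succ (s := r-16) (n := 15) (step := 1)
          simpa [show r-16+1 = r-15 by omega] using this
        rw [hc]; simp
      have hRw : pvWin M (r+1) = (List.range' (r-15) 16).map (pvWf M) := by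
        unfold pvWin
        rw [show min (r+1) 16 = 16 by omega, show r+1-16 = r-15 by omega]
      have hcat : List.range' (r-15) 16 = List.range' (r-15) 15 ++ [r] := by
        have := List.range'_concat (s := r-15) (n := 15) (step := 1)
        simpa [show r-15+1*15 = r by omega] using this
      rw [hL, hRw, hcat]; simp
    simp only [pvStepB, pvStepA, if_neg hri, hw, hwin, htn, pvSchedA_getD M r hr]

-- the main loop equality, by induction on the number of remaining rounds
lemma pvLoop_sync (M : List Int) (R : Int) (hR : R ≤ 64) :
    ∀ (n : Nat) (r : Nat), (r : Int) + n = max R 0 →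
      ∀ st : pvStA,
        ((PySem.List.pyRange r R 1).foldl (pvStepB M) (pvWin M r, st)).2
          = (PySem.List.pyRange r R 1).foldl (pvStepA (pvSchedA M)) st := by
  intro n
  induction n with
  | zero =>
      intro r hr st
      rw [pvRange_nil _ _ (by omega)]
      simp
  | succ m ih =>
      intro r hr st
      have hlt : (r : Int) < R := by omega
      rw [PySem.List.pyRange_one_cons hlt]
      simp only [List.foldl_cons]
      rw [pvStep_sync M r (by omega) st]
      have hcast : ((r : Int)) + 1 = ((r + 1 : Nat) : Int) := by push_cast; ring
      rw [hcast]
      exact ih (r+1) (by omega) _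

-- ===== VERDICT (by name: the statement is the Claim_ definition above) =====
theorem carry_count_spec : Claim_equal_carry_count := by
  intro M R _hDom hPre
  have h0 : pvWin M 0 = [] := by simp [pvWin]
  have hs := pvLoop_sync M R hPre (max R 0).toNat 0 (by omega)
    (0x6a09e667, 0xbb67ae85, 0x3c6ef372, 0xa54ff53a, 0x510e527f, 0x9b05688c, 0x1f83d9ab, 0x5be0cd19, 0)
  rw [h0] at hs
  simp only [Nat.cast_zero] at hs
  show ((PySem.List.pyRange 0 R 1).foldl (pvStepA (pvSchedA M))
      (0x6a09e667, 0xbb67ae85, 0x3c6ef372, 0xa54ff53a, 0x510e527f, 0x9b05688c, 0x1f83d9ab, 0x5be0cd19, 0)).2.2.2.2.2.2.2.2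
    = ((PySem.List.pyRange 0 R 1).foldl (pvStepB M)
      ([], 0x6a09e667, 0xbb67ae85, 0x3c6ef372, 0xa54ff53a, 0x510e527f, 0x9b05688c, 0x1f83d9ab, 0x5be0cd19, 0)).2.2.2.2.2.2.2.2.2
  rw [← hs]
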